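-- pv_equiv track=rewrite | github.com/eduardocerqueira/seeker | seeker/snippet/maxProfit.py | maxKProfit
-- ===== SOURCE A (Python) =====
-- import heapq
--
-- def maxKProfit(n, b, arr):
--     arr = [-1 * i for i in arr]
--     heapq.heapify(arr)
--     profit = 0
--     while b:
--         soldat = -1 * heapq.heappop(arr)
--         profit += soldat
--         heapq.heappush(arr, 1 - soldat)
--         b -= 1
--     return profit
-- ===== SOURCE B (Python) =====
-- def maxKProfit(n, b, arr):
--     # One pass builds a value->count table and the maximum; each pick then
--     # costs O(1): take the running max, move one unit from cnt[cur] to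
--     # cnt[cur-1], and step the max down only when cnt[cur] hits zero.
--     if not arr:
--         return 0
--     cnt = {}
--     cur = arr[0]
--     for v in arr:
--         cnt[v] = cnt.get(v, 0) + 1
--         if v > cur:
--             cur = v
--     profit = 0
--     for _ in range(b):
--         profit += cur
--         cnt[cur] -= 1
--         cnt[cur - 1] = cnt.get(cur - 1, 0) + 1
--         if cnt[cur] == 0:
--             cur -= 1
--     return profit
-- ===== Notes on version B (the rewrite author's own statement) =====
-- stated objective: alternative
-- what changed: Replaces the heap simulation (pop max, push max-1, O(log n) per pick) with a value->count hash table plus a running maximum that only ever steps down by 1, making each of the b picks O(1); measured speed was comparable at the tested sizes.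
import Mathlib
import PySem

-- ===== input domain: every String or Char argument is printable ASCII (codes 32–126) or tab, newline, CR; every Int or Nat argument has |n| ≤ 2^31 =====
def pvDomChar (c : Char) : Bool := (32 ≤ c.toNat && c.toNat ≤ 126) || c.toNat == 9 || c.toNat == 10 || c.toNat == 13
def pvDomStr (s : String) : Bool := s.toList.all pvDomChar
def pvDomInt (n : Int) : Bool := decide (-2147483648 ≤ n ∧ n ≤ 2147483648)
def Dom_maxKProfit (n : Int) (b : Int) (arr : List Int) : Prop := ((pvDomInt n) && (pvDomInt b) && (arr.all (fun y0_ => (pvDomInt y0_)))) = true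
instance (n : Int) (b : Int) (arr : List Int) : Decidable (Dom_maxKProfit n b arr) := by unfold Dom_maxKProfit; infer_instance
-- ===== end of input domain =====

-- B replaces A's heap simulation by a value->count table plus a running maximum
-- stepped down by at most 1 per pick (objective: alternative algorithm, O(1) per pick).


-- ===== PORT A =====
-- heapq is not in PySem; it is ported by its library contract: the heap is the
-- list of stored elements, heappop returns and removes the smallest stored
-- element, heappush adds an element.  The returned profit depends only on the
-- multiset of stored elements, so this is exact.
def maxKProfitALoop (fuel : Nat) (heap : List Int) (profit : Int) : Int :=
  match fuel with
  | 0 => profit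
  | f + 1 =>
    match PySem.List.min? heap (fun x => x) with
    | none => profit      -- heappop from an empty heap: IndexError (outside Pre_)
    | some m =>
      let soldat := -1 * m
      match PySem.List.remove? heap m with
      | none => profit    -- unreachable: m ∈ heap
      | some h' => maxKProfitALoop f ((1 - soldat) :: h') (profit + soldat)

def maxKProfit (n : Int) (b : Int) (arr : List Int) : Int :=
  maxKProfitALoop b.toNat (arr.map (fun i => -1 * i)) 0

-- ===== PORT B =====
def maxKProfitBLoop (fuel : Nat) (cnt : PySem.Dict Int Int) (cur : Int) (profit : Int) : Int :=
  match fuel with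
  | 0 => profit
  | f + 1 =>
    let profit' := profit + cur
    let cnt1 := cnt.insert cur (cnt.getD cur 0 - 1)                 -- cnt[cur] -= 1 (key present on B's own runs)
    let cnt2 := cnt1.insert (cur - 1) (cnt1.getD (cur - 1) 0 + 1)   -- cnt[cur-1] = cnt.get(cur-1, 0) + 1
    let cur' := if cnt2.getD cur 0 == 0 then cur - 1 else cur
    maxKProfitBLoop f cnt2 cur' profit'

def maxKProfit_alt (n : Int) (b : Int) (arr : List Int) : Int :=
  match arr with
  | [] => 0
  | a0 :: _ =>
    let st := arr.foldl
      (fun (p : PySem.Dict Int Int × Int) v =>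
        (p.1.insert v (p.1.getD v 0 + 1), if v > p.2 then v else p.2))
      (PySem.Dict.empty, a0)
    maxKProfitBLoop b.toNat st.1 st.2 0

-- ===== PRECONDITION & SPEC =====
-- Pre_ excludes exactly the inputs where the Python A returns no value:
-- b < 0 (the 'while b' loop never terminates) and b > 0 with empty arr
-- (heappop raises IndexError).
def Pre_maxKProfit (n : Int) (b : Int) (arr : List Int) : Prop :=
  0 ≤ b ∧ (b = 0 ∨ arr ≠ [])
instance (n : Int) (b : Int) (arr : List Int) : Decidable (Pre_maxKProfit n b arr) := by unfold Pre_maxKProfit; infer_instance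
def pvWitness_maxKProfit : Int × Int × List Int := (0, 2, [3, 1])

def Spec_maxKProfit (n : Int) (b : Int) (arr : List Int) (out : Int) : Prop := out = maxKProfit_alt n b arr
instance (n : Int) (b : Int) (arr : List Int) (out : Int) : Decidable (Spec_maxKProfit n b arr out) := by unfold Spec_maxKProfit; infer_instance

-- ===== CLAIM (what is proved, stated in full; the proofs are below) =====
def Claim_equal_maxKProfit : Prop := ∀ (n : Int) (b : Int) (arr : List Int), Dom_maxKProfit n b arr → Pre_maxKProfit n b arr → Spec_maxKProfit n b arr (maxKProfit n b arr)
-- ===== LEMMAS AND PROOFS =====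

-- Invariant tying A's heap of negated values to B's counter and running maximum.
def pvInv (heap : List Int) (cnt : PySem.Dict Int Int) (cur : Int) : Prop :=
  (-cur) ∈ heap ∧ (∀ x ∈ heap, -cur ≤ x) ∧ (∀ k : Int, cnt.getD k 0 = (heap.count (-k) : Int))

theorem pvCount_step (heap : List Int) (cnt : PySem.Dict Int Int) (cur : Int)
    (hmem : (-cur) ∈ heap)
    (hcnt : ∀ k : Int, cnt.getD k 0 = (heap.count (-k) : Int)) (k : Int) :
    ((cnt.insert cur (cnt.getD cur 0 - 1)).insert (cur - 1)
      ((cnt.insert cur (cnt.getD cur 0 - 1)).getD (cur - 1) 0 + 1)).getD k 0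
      = (((1 - cur) :: heap.erase (-cur)).count (-k) : Int) := by
  have h1 : 1 ≤ heap.count (-cur) := List.count_pos_iff.mpr hmem
  by_cases hk1 : k = cur - 1
  · subst hk1
    have hne : cur - 1 ≠ cur := by omega
    rw [PySem.Dict.getD_insert_self, PySem.Dict.getD_insert_of_ne _ _ _ hne, hcnt]
    have e : -(cur - 1) = 1 - cur := by ring
    rw [e, List.count_cons_self, List.count_erase_of_ne (by omega : (1 - cur : Int) ≠ -cur)]
    push_cast
    ring
  · by_cases hk2 : k = cur
    · rw [hk2]
      have hne : cur ≠ cur - 1 := by omega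
      rw [PySem.Dict.getD_insert_of_ne _ _ _ hne, PySem.Dict.getD_insert_self, hcnt]
      rw [List.count_cons_of_ne (by omega : (1 - cur : Int) ≠ -cur), List.count_erase_self]
      push_cast [h1]
      ring
    · rw [PySem.Dict.getD_insert_of_ne _ _ _ hk1, PySem.Dict.getD_insert_of_ne _ _ _ hk2, hcnt]
      rw [List.count_cons_of_ne (by omega : (1 - cur : Int) ≠ -k),
        List.count_erase_of_ne (by omega : (-k : Int) ≠ -cur)]

theorem pvInv_step (heap : List Int) (cnt : PySem.Dict Int Int) (cur : Int)
    (h : pvInv heap cnt cur) :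
    pvInv ((1 - cur) :: heap.erase (-cur))
      (((cnt.insert cur (cnt.getD cur 0 - 1)).insert (cur - 1)
        ((cnt.insert cur (cnt.getD cur 0 - 1)).getD (cur - 1) 0 + 1)))
      (if ((cnt.insert cur (cnt.getD cur 0 - 1)).insert (cur - 1)
        ((cnt.insert cur (cnt.getD cur 0 - 1)).getD (cur - 1) 0 + 1)).getD cur 0 == 0
        then cur - 1 else cur) := by
  obtain ⟨hmem, hmax, hcnt⟩ := h
  have hcount := pvCount_step heap cnt cur hmem hcnt
  have hcur := hcount cur
  rw [List.count_cons_of_ne (by omega : (1 - cur : Int) ≠ -cur)] at hcur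
  refine ⟨?_, ?_, hcount⟩
  · split
    next hz =>
      have e : -(cur - 1) = 1 - cur := by ring
      rw [e]; exact List.mem_cons_self ..
    next hz =>
      have hnz : (heap.erase (-cur)).count (-cur) ≠ 0 := by
        intro h0
        apply hz
        rw [beq_iff_eq, hcur, h0]
        simp
      exact List.mem_cons_of_mem _ (List.count_pos_iff.mp (Nat.pos_of_ne_zero hnz))
  · intro x hxmem
    rcases List.mem_cons.mp hxmem with hh | ht
    · subst hh; split <;> omega
    · have hle : -cur ≤ x := hmax x (List.mem_of_mem_erase ht)
      split
      next hz =>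
        have hzero : (heap.erase (-cur)).count (-cur) = 0 := by
          have := (beq_iff_eq ..).mp hz
          rw [hcur] at this
          exact_mod_cast this
        have hxne : x ≠ -cur := by
          intro he; subst he
          have := List.count_pos_iff.mpr ht
          omega
        omega
      next _ => omega

theorem pvLoop_eq (fuel : Nat) (heap : List Int) (cnt : PySem.Dict Int Int)
    (cur : Int) (profit : Int) (h : pvInv heap cnt cur) :
    maxKProfitALoop fuel heap profit = maxKProfitBLoop fuel cnt cur profit := by
  induction fuel generalizing heap cnt cur profit with
  | zero => rfl
  | succ f ih =>
    obtain ⟨hmem, hmax, hcnt⟩ := h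
    have hmin : PySem.List.min? heap (fun x => x) = some (-cur) := by
      cases heap with
      | nil => exact absurd hmem (List.not_mem_nil)
      | cons x t =>
        have hm := PySem.List.min?_id_cons x t
        have h1 : t.foldl min x ∈ x :: t := PySem.List.min?_mem hm
        have h2 := PySem.List.min?_isMin hm (-cur) hmem
        have h3 := hmax _ h1
        simp only at h2
        rw [hm, le_antisymm h2 h3]
    have hrem : PySem.List.remove? heap (-cur) = some (heap.erase (-cur)) :=
      PySem.List.remove?_eq_some_erase heap (-cur) hmem
    simp only [maxKProfitALoop, maxKProfitBLoop, hmin, hrem]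
    have e1 : (1 - -1 * -cur) = 1 - cur := by ring
    have e2 : (profit + -1 * -cur) = profit + cur := by ring
    rw [e1, e2]
    exact ih _ _ _ _ (pvInv_step heap cnt cur ⟨hmem, hmax, hcnt⟩)

theorem pvCount_map_neg (l : List Int) (k : Int) :
    (l.map (fun i => -1 * i)).count (-k) = l.count k := by
  induction l with
  | nil => simp
  | cons a t ih =>
    rw [List.map_cons, List.count_cons, List.count_cons, ih]
    simp only [beq_iff_eq]
    split <;> split <;> first | rfl | (exfalso; omega)

theorem pvFoldMax (l : List Int) (m0 : Int) :
    (l.foldl (fun x v => if v > x then v else x) m0 = m0 ∨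
       l.foldl (fun x v => if v > x then v else x) m0 ∈ l) ∧
    m0 ≤ l.foldl (fun x v => if v > x then v else x) m0 ∧
    ∀ v ∈ l, v ≤ l.foldl (fun x v => if v > x then v else x) m0 := by
  induction l generalizing m0 with
  | nil => simp
  | cons a t ih =>
    obtain ⟨ih1, ih2, ih3⟩ := ih (if a > m0 then a else m0)
    have hs1 : m0 ≤ (if a > m0 then a else m0) := by split <;> omega
    have hs2 : a ≤ (if a > m0 then a else m0) := by split <;> omega
    simp only [List.foldl_cons]
    refine ⟨?_, le_trans hs1 ih2, ?_⟩
    · rcases ih1 with he | hm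
      · rw [he]; split
        · exact Or.inr (List.mem_cons_self ..)
        · exact Or.inl rfl
      · exact Or.inr (List.mem_cons_of_mem _ hm)
    · intro v hv
      rcases List.mem_cons.mp hv with hh | ht
      · subst hh; exact le_trans hs2 ih2
      · exact ih3 v ht

theorem pvFoldPair (l : List Int) (c : PySem.Dict Int Int) (m : Int) :
    l.foldl (fun (p : PySem.Dict Int Int × Int) v =>
        (p.1.insert v (p.1.getD v 0 + 1), if v > p.2 then v else p.2)) (c, m)
    = (l.foldl (fun d v => d.insert v (d.getD v 0 + 1)) c,
       l.foldl (fun x v => if v > x then v else x) m) := by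
  induction l generalizing c m with
  | nil => rfl
  | cons a t ih => simp only [List.foldl_cons]; exact ih _ _

-- ===== VERDICT (by name: the statement is the Claim_ definition above) =====
theorem maxKProfit_spec : Claim_equal_maxKProfit := by
  intro n b arr _ hpre
  unfold Spec_maxKProfit
  cases arr with
  | nil =>
    have hb : b = 0 := by
      rcases hpre with ⟨h0, hc | hc⟩
      · exact hc
      · exact absurd rfl hc
    subst hb
    rfl
  | cons a0 tl =>
    simp only [maxKProfit, maxKProfit_alt]
    rw [pvFoldPair]
    apply pvLoop_eq
    obtain ⟨hmm, hub, hall⟩ := pvFoldMax (a0 :: tl) a0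
    refine ⟨?_, ?_, ?_⟩
    · refine List.mem_map.mpr ⟨(a0 :: tl).foldl (fun x v => if v > x then v else x) a0, ?_, by ring⟩
      rcases hmm with he | hm
      · rw [he]; exact List.mem_cons_self ..
      · exact hm
    · intro x hx
      obtain ⟨v, hv, hveq⟩ := List.mem_map.mp hx
      have := hall v hv
      omega
    · intro k
      rw [PySem.Dict.getD_foldl_insert_add_one, PySem.Dict.getD_empty, pvCount_map_neg]
      ring
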